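-- pv_equiv track=rewrite | github.com/Dimj1k/Works | Python3/Закончено. Промежуток чисел.py | simple_composite
-- ===== SOURCE A (Python) =====
-- def simple_composite(a):
--     i = 0
--     b = 0
--     while type(a) == int and i <= a:
--         i = i + 1
--         if a % i == 0:
--             b = b + 1
--         if b > 2:
--             break
--     return b
-- ===== SOURCE B (Python) =====
-- def simple_composite(a):
--     if a < 0:
--         return 0
--     if a <= 1:
--         return 1
--     d = 2
--     while d * d <= a:
--         if a % d == 0:
--             return 3
--         d += 1
--     return 2
-- ===== Notes on version B (the rewrite author's own statement) =====
-- stated objective: alternative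
-- what changed: Replaces A's linear scan over all candidate divisors (stopping at the third hit) by trial division up to the square root, classifying the argument as negative, trivial, prime or composite and returning the corresponding capped divisor count directly.
import Mathlib
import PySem

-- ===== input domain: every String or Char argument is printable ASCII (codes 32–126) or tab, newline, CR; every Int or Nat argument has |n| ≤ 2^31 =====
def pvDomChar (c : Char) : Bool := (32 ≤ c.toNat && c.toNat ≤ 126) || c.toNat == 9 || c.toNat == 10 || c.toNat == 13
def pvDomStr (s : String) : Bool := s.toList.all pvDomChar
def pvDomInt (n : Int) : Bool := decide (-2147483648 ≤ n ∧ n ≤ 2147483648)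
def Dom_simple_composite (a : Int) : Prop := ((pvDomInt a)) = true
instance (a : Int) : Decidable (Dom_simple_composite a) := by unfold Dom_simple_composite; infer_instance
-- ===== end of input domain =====

-- B replaces A's linear divisor scan (capped at three hits) by trial division up to the square root; same values everywhere.

-- ===== PORT A =====
-- while-loop of A: i counts up while i ≤ a, b counts divisors, break once b > 2
def pvLoopA (a i b : Int) : Int :=
  if _h : i ≤ a then
    let i' := i + 1
    let b' := if PySem.Int.mod a i' = 0 then b + 1 else b
    if b' > 2 then b' else pvLoopA a i' b'
  else b
termination_by (a + 1 - i).toNat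
decreasing_by omega

def simple_composite (a : Int) : Int := pvLoopA a 0 0

-- ===== PORT B =====
-- while d*d <= a: if a % d == 0: return 3 (composite found); else d += 1; fall through: no small factor
def pvTrial (a d : Int) : Bool :=
  if _h : d * d ≤ a then
    if PySem.Int.mod a d = 0 then true else pvTrial a (d + 1)
  else false
termination_by (a + 1 - d).toNat
decreasing_by
  have h1 : 2 * d - 1 ≤ d * d := by nlinarith [sq_nonneg (d - 1)]
  have h0 : 0 ≤ d * d := mul_self_nonneg d
  omega

def simple_composite_alt (a : Int) : Int :=
  if a < 0 then 0
  else if a ≤ 1 then 1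
  else if pvTrial a 2 then 3 else 2

-- ===== PRECONDITION & SPEC =====
def Spec_simple_composite (a : Int) (out : Int) : Prop := out = simple_composite_alt a
instance (a : Int) (out : Int) : Decidable (Spec_simple_composite a out) := by unfold Spec_simple_composite; infer_instance

-- ===== CLAIM (what is proved, stated in full; the proofs are below) =====
def Claim_equal_simple_composite : Prop := ∀ (a : Int), Dom_simple_composite a → Spec_simple_composite a (simple_composite a)

-- ===== LEMMAS AND PROOFS =====

-- number of j in (i, a+1] with a % j == 0 (the divisors A's loop still has to visit)
noncomputable def pvDivCnt (a i : Int) : ℕ :=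
  ((Finset.Icc (i + 1) (a + 1)).filter (fun j => PySem.Int.mod a j = 0)).card

lemma pvDivCnt_step (a i : Int) (h : i ≤ a) :
    pvDivCnt a i =
      (if PySem.Int.mod a (i + 1) = 0 then 1 else 0) + pvDivCnt a (i + 1) := by
  unfold pvDivCnt
  have hins : Finset.Icc (i + 1) (a + 1) = insert (i + 1) (Finset.Icc (i + 1 + 1) (a + 1)) := by
    ext j
    simp only [Finset.mem_insert, Finset.mem_Icc]
    omega
  rw [hins, Finset.filter_insert]
  have hnot : (i + 1) ∉ Finset.Icc (i + 1 + 1) (a + 1) := by simp [Finset.mem_Icc]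
  split_ifs with hm
  · rw [Finset.card_insert_of_notMem (fun hc => hnot (Finset.mem_of_mem_filter _ hc))]
    omega
  · omega

lemma pvDivCnt_zero (a i : Int) (h : a < i) : pvDivCnt a i = 0 := by
  unfold pvDivCnt
  have : Finset.Icc (i + 1) (a + 1) = ∅ := by
    apply Finset.Icc_eq_empty
    omega
  simp [this]

-- invariant of A's loop: with 0 ≤ b ≤ 2 it returns min 3 (b + remaining divisor count)
lemma pvLoopA_fuel (a : Int) :
    ∀ n (i b : Int), (a + 1 - i).toNat ≤ n → 0 ≤ b → b ≤ 2 →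
      pvLoopA a i b = min 3 (b + (pvDivCnt a i : Int)) := by
  intro n
  induction n with
  | zero =>
    intro i b hn hb0 hb2
    rw [pvLoopA, dif_neg (by omega), pvDivCnt_zero a i (by omega)]
    omega
  | succ n ih =>
    intro i b hn hb0 hb2
    by_cases h : i ≤ a
    · have hstep := pvDivCnt_step a i h
      rw [pvLoopA]
      simp only [dif_pos h]
      by_cases hm : PySem.Int.mod a (i + 1) = 0
      · rw [if_pos hm] at hstep
        rw [if_pos hm]
        by_cases hb : b + 1 > 2
        · rw [if_pos hb, hstep]
          push_cast
          omega
        · rw [if_neg hb, ih (i + 1) (b + 1) (by omega) (by omega) (by omega), hstep]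
          push_cast
          omega
      · rw [if_neg hm] at hstep
        rw [if_neg hm, if_neg (by omega), ih (i + 1) b (by omega) hb0 hb2, hstep]
        push_cast
        omega
    · rw [pvLoopA, dif_neg h, pvDivCnt_zero a i (by omega)]
      omega

-- characterisation of B's trial loop (for d ≥ 2, its invariant)
lemma pvTrial_fuel (a : Int) :
    ∀ n (d : Int), 2 ≤ d → (a + 1 - d).toNat ≤ n →
      (pvTrial a d = true ↔ ∃ e, d ≤ e ∧ e * e ≤ a ∧ PySem.Int.mod a e = 0) := by
  intro n
  induction n with
  | zero =>
    intro d hd hn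
    have hda : a < d := by omega
    rw [pvTrial, dif_neg (by nlinarith)]
    simp only [Bool.false_eq_true, false_iff]
    rintro ⟨e, he1, he2, he3⟩
    nlinarith
  | succ n ih =>
    intro d hd hn
    by_cases hg : d * d ≤ a
    · have hda : d ≤ a := by nlinarith
      rw [pvTrial, dif_pos hg]
      by_cases hm : PySem.Int.mod a d = 0
      · rw [if_pos hm]
        simp only [true_iff]
        exact ⟨d, le_refl d, hg, hm⟩
      · rw [if_neg hm, ih (d + 1) (by omega) (by omega)]
        constructor
        · rintro ⟨e, he1, he2, he3⟩; exact ⟨e, by omega, he2, he3⟩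
        · rintro ⟨e, he1, he2, he3⟩
          refine ⟨e, ?_, he2, he3⟩
          rcases eq_or_lt_of_le he1 with rfl | hlt
          · exact absurd he3 hm
          · omega
    · rw [pvTrial, dif_neg hg]
      simp only [Bool.false_eq_true, false_iff]
      rintro ⟨e, he1, he2, he3⟩
      have : d * d ≤ e * e := by nlinarith
      omega

lemma pvTrial_iff (a : Int) :
    pvTrial a 2 = true ↔ ∃ e, 2 ≤ e ∧ e * e ≤ a ∧ PySem.Int.mod a e = 0 :=
  pvTrial_fuel a (a + 1 - 2).toNat 2 (by omega) (by omega)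

-- a composite a ≥ 2 has a divisor e with e*e ≤ a
lemma small_factor (a d : Int) (ha : 2 ≤ a) (hd1 : 1 < d) (hda : d < a) (hdvd : d ∣ a) :
    ∃ e, 2 ≤ e ∧ e * e ≤ a ∧ e ∣ a := by
  obtain ⟨c, hc⟩ := hdvd
  have hc1 : 1 ≤ c := by nlinarith
  have hc2 : 2 ≤ c := by
    by_cases h : c = 1
    · subst h; omega
    · omega
  by_cases h : d ≤ c
  · exact ⟨d, by omega, by nlinarith, ⟨c, hc⟩⟩
  · exact ⟨c, hc2, by nlinarith, ⟨d, by rw [hc]; ring⟩⟩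

-- trial true → three distinct divisors 1, e, a in (0, a+1]
lemma cnt_of_composite (a : Int) (ha : 2 ≤ a) (h : pvTrial a 2 = true) :
    3 ≤ pvDivCnt a 0 := by
  obtain ⟨e, he1, he2, he3⟩ := (pvTrial_iff a).mp h
  have hea : e < a := by nlinarith
  have hsub : ({1, e, a} : Finset ℤ) ⊆
      (Finset.Icc (0 + 1) (a + 1)).filter (fun j => PySem.Int.mod a j = 0) := by
    intro j hj
    simp only [Finset.mem_insert, Finset.mem_singleton] at hj
    simp only [Finset.mem_filter, Finset.mem_Icc]
    rcases hj with rfl | rfl | rfl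
    · exact ⟨by omega, by rw [PySem.Int.mod_eq_zero_iff_dvd]; exact one_dvd a⟩
    · exact ⟨by omega, he3⟩
    · exact ⟨by omega, by rw [PySem.Int.mod_eq_zero_iff_dvd]⟩
  have hcard : ({1, e, a} : Finset ℤ).card = 3 := by
    rw [Finset.card_insert_of_notMem (by simp; omega),
        Finset.card_insert_of_notMem (by simp; omega), Finset.card_singleton]
  calc 3 = ({1, e, a} : Finset ℤ).card := hcard.symm
    _ ≤ _ := Finset.card_le_card hsub
  
-- trial false → the only divisors in (0, a+1] are 1 and a
lemma cnt_of_prime (a : Int) (ha : 2 ≤ a) (h : pvTrial a 2 = false) :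
    pvDivCnt a 0 = 2 := by
  have hno : ∀ e, 2 ≤ e → e * e ≤ a → PySem.Int.mod a e ≠ 0 := by
    intro e h1 h2 h3
    have : pvTrial a 2 = true := (pvTrial_iff a).mpr ⟨e, h1, h2, h3⟩
    rw [h] at this; exact absurd this (by simp)
  unfold pvDivCnt
  have hset : (Finset.Icc (0 + 1) (a + 1)).filter (fun j => PySem.Int.mod a j = 0)
      = ({1, a} : Finset ℤ) := by
    ext j
    simp only [Finset.mem_filter, Finset.mem_Icc, Finset.mem_insert, Finset.mem_singleton]
    constructor
    · rintro ⟨⟨hj1, hj2⟩, hm⟩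
      have hja : j ≠ a + 1 := by
        rintro rfl
        rw [PySem.Int.mod_eq_zero_iff_dvd] at hm
        obtain ⟨c, hc⟩ := hm
        by_cases h0 : c ≤ 0
        · nlinarith
        · nlinarith
      have hdvd : j ∣ a := by rw [← PySem.Int.mod_eq_zero_iff_dvd]; exact hm
      by_contra hcon
      have hne1 : j ≠ 1 := fun h => hcon (Or.inl h)
      have hnea : j ≠ a := fun h => hcon (Or.inr h)
      have hj1' : 1 < j := by omega
      have hja' : j < a := by
        by_cases h' : j < a
        · exact h'
        · exfalso
          have := Int.le_of_dvd (by omega) hdvd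
          omega
      obtain ⟨e, he1, he2, he3⟩ := small_factor a j ha hj1' hja' hdvd
      exact hno e he1 he2 (by rw [PySem.Int.mod_eq_zero_iff_dvd]; exact he3)
    · rintro (rfl | rfl)
      · exact ⟨by omega, by rw [PySem.Int.mod_eq_zero_iff_dvd]; exact one_dvd a⟩
      · exact ⟨by omega, by rw [PySem.Int.mod_eq_zero_iff_dvd]⟩
  rw [hset]
  rw [Finset.card_insert_of_notMem (by simp; omega), Finset.card_singleton]

-- ===== VERDICT (by name: the statement is the Claim_ definition above) =====
theorem simple_composite_spec : Claim_equal_simple_composite := by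
  intro a _
  unfold Spec_simple_composite simple_composite simple_composite_alt
  rw [pvLoopA_fuel a (a + 1).toNat 0 0 (by omega) (by omega) (by omega)]
  by_cases hneg : a < 0
  · rw [pvDivCnt_zero a 0 hneg, if_pos hneg]
    omega
  · rw [if_neg (by omega)]
    by_cases h1 : a ≤ 1
    · rw [if_pos h1]
      interval_cases a
      · rw [show pvDivCnt 0 0 = 1 from by decide]
        omega
      · rw [show pvDivCnt 1 0 = 1 from by decide]
        omega
    · rw [if_neg h1]
      by_cases hT : pvTrial a 2 = true
      · rw [if_pos hT]
        have h3 := cnt_of_composite a (by omega) hT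
        omega
      · rw [Bool.not_eq_true] at hT
        rw [if_neg (by simp [hT]), cnt_of_prime a (by omega) hT]
        omega
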